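-- pv_equiv track=rewrite | github.com/zach-mc/Code-Portfolio | Coding Projects/Python/InputStringManipulation.py | reverse_and_space_uppercase_vowels
-- ===== SOURCE A (Python) =====
-- def reverse_and_space_uppercase_vowels(string):
--     count = 0
--     stringin = string
--     newstring = ''
--     revstring = ''
--
--     for i in string:
--         if i == 'a' or i == 'e' or i == 'i' or i == 'o' or i == 'u':
--             newstring += i.upper() + ' '
--         else:
--             newstring += i.lower()
--
--     for i in range(len(newstring)):
--         revstring += newstring[len(newstring) - 1 - i]
--
--     return revstring
-- ===== SOURCE B (Python) =====
-- def reverse_and_space_uppercase_vowels(string):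
--     pieces = []
--     for c in reversed(string):
--         if c in ('a', 'e', 'i', 'o', 'u'):
--             pieces.append(' ' + c.upper())
--         else:
--             pieces.append(c.lower())
--     return ''.join(pieces)
-- ===== Notes on version B (the rewrite author's own statement) =====
-- stated objective: faster
-- what changed: Single pass over the characters in reverse order, emitting a space-plus-uppercased-vowel or lowercased piece per char and joining once, instead of A's transform pass of repeated string concatenations followed by a separate index-driven reversal pass.
import Mathlib
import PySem

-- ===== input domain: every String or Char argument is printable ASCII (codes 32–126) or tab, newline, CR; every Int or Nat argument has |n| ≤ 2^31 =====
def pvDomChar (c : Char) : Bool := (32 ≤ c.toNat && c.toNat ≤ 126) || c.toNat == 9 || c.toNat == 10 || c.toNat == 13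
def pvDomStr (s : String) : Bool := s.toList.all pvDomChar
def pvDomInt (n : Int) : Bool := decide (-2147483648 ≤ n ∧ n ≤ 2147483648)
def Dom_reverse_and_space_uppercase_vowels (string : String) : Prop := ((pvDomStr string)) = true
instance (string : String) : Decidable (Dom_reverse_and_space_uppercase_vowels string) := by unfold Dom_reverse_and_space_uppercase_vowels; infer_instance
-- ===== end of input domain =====

-- B builds the result in one reverse pass (piece per char), instead of A's transform pass plus an index-driven reversal pass; objective: simpler.

-- ===== PORT A =====
-- first loop: newstring accumulated char-append by char-append
def pvAStep (acc : List Char) (c : Char) : List Char :=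
  if c == 'a' || c == 'e' || c == 'i' || c == 'o' || c == 'u' then
    acc ++ [PySem.Chars.upperChar c, ' ']
  else
    acc ++ [PySem.Chars.lowerChar c]

def reverse_and_space_uppercase_vowels (string : String) : String :=
  let newstring : List Char := string.toList.foldl pvAStep []
  -- second loop: revstring += newstring[len - 1 - i]; the index is always in range,
  -- so getD with a dummy default is exact here
  let revstring : List Char :=
    (List.range newstring.length).foldl
      (fun acc i => acc ++ [newstring.getD (newstring.length - 1 - i) ' ']) []
  String.ofList revstring

-- ===== PORT B =====
def pvBPiece (c : Char) : List Char :=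
  if c == 'a' || c == 'e' || c == 'i' || c == 'o' || c == 'u' then
    [' ', PySem.Chars.upperChar c]
  else
    [PySem.Chars.lowerChar c]

def reverse_and_space_uppercase_vowels_alt (string : String) : String :=
  String.ofList (string.toList.reverse.flatMap pvBPiece)

-- ===== PRECONDITION & SPEC =====
def Spec_reverse_and_space_uppercase_vowels (string : String) (out : String) : Prop := out = reverse_and_space_uppercase_vowels_alt string
instance (string : String) (out : String) : Decidable (Spec_reverse_and_space_uppercase_vowels string out) := by unfold Spec_reverse_and_space_uppercase_vowels; infer_instance

-- ===== CLAIM (what is proved, stated in full; the proofs are below) =====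
def Claim_equal_reverse_and_space_uppercase_vowels : Prop := ∀ (string : String), Dom_reverse_and_space_uppercase_vowels string → Spec_reverse_and_space_uppercase_vowels string (reverse_and_space_uppercase_vowels string)

-- ===== LEMMAS AND PROOFS =====

-- A's first loop is a flatMap of the per-character pieces (in forward order)
def pvAPiece (c : Char) : List Char :=
  if c == 'a' || c == 'e' || c == 'i' || c == 'o' || c == 'u' then
    [PySem.Chars.upperChar c, ' ']
  else
    [PySem.Chars.lowerChar c]

theorem pvAStep_eq (acc : List Char) (c : Char) : pvAStep acc c = acc ++ pvAPiece c := by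
  unfold pvAStep pvAPiece
  split_ifs <;> rfl

theorem pvA_loop1 (l : List Char) (acc : List Char) :
    l.foldl pvAStep acc = acc ++ l.flatMap pvAPiece := by
  induction l generalizing acc with
  | nil => simp
  | cons c t ih => simp [List.foldl_cons, pvAStep_eq, ih]

-- A's second loop reverses the list
theorem pvA_loop2 (l : List Char) (k : Nat) (hk : k ≤ l.length) :
    (List.range k).foldl (fun acc i => acc ++ [l.getD (l.length - 1 - i) ' ']) []
      = l.reverse.take k := by
  induction k with
  | zero => simp
  | succ k ih =>
      have hk' : k ≤ l.length := Nat.le_of_succ_le hk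
      have hklt : k < l.length := hk
      have hidx : l.length - 1 - k < l.length := by omega
      have hkr : k < l.reverse.length := by simpa using hklt
      rw [List.range_succ, List.foldl_append, ih hk']
      simp only [List.foldl_cons, List.foldl_nil]
      have h1 : l.getD (l.length - 1 - k) ' ' = l[l.length - 1 - k]'hidx :=
        List.getD_eq_getElem l ' ' hidx
      have h2 : l.reverse[k]'hkr = l[l.length - 1 - k]'hidx := by
        rw [List.getElem_reverse]
      rw [List.take_add_one, List.getElem?_eq_getElem hkr]
      rw [h1, ← h2]
      rfl

theorem pvPiece_rev (c : Char) : (pvAPiece c).reverse = pvBPiece c := by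
  unfold pvAPiece pvBPiece
  split_ifs <;> rfl

-- ===== VERDICT (by name: the statement is the Claim_ definition above) =====
theorem reverse_and_space_uppercase_vowels_spec : Claim_equal_reverse_and_space_uppercase_vowels := by
  intro s _
  unfold Spec_reverse_and_space_uppercase_vowels
  unfold reverse_and_space_uppercase_vowels reverse_and_space_uppercase_vowels_alt
  simp only [pvA_loop1, List.nil_append]
  rw [pvA_loop2 _ _ (Nat.le_refl _)]
  have hlen : (List.flatMap pvAPiece s.toList).length
      = (List.flatMap pvAPiece s.toList).reverse.length := (List.length_reverse).symm
  rw [hlen, List.take_length, List.reverse_flatMap]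
  rw [show (List.reverse ∘ pvAPiece) = pvBPiece from funext pvPiece_rev]
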